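-- pv_equiv track=rewrite | github.com/amoldwin/GeoStab_Asher | generate_esmfold_mutant_structures.py | create_batched_job_dataset
-- ===== SOURCE A (Python) =====
-- def create_batched_job_dataset(
--     jobs, max_tokens_per_batch: int
-- ):
--     """
--     jobs: list of (header, seq, pdb_path, pkl_path)
--     Yields batches: (headers, seqs, pdb_paths, pkl_paths)
--     grouped so that total sequence length <= max_tokens_per_batch.
--     """
--     batch_headers = []
--     batch_seqs = []
--     batch_pdbs = []
--     batch_pkls = []
--     num_tokens = 0
--
--     for header, seq, pdb_path, pkl_path in jobs:
--         seq_len = len(seq)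
--         if num_tokens > 0 and (num_tokens + seq_len > max_tokens_per_batch):
--             # Yield current batch
--             yield batch_headers, batch_seqs, batch_pdbs, batch_pkls
--             batch_headers, batch_seqs = [], []
--             batch_pdbs, batch_pkls = [], []
--             num_tokens = 0
--
--         batch_headers.append(header)
--         batch_seqs.append(seq)
--         batch_pdbs.append(pdb_path)
--         batch_pkls.append(pkl_path)
--         num_tokens += seq_len
--
--     if batch_headers:
--         yield batch_headers, batch_seqs, batch_pdbs, batch_pkls
-- ===== SOURCE B (Python) =====
-- def create_batched_job_dataset(jobs, max_tokens_per_batch: int):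
--     """Two-pass version: first decide the batch sizes with the greedy token
--     rule, then assemble and yield the column-split batches."""
--     jobs = list(jobs)
--     # Pass 1: batch sizes (number of jobs per batch).
--     sizes = []
--     count = 0
--     tokens = 0
--     for _, seq, _, _ in jobs:
--         seq_len = len(seq)
--         if tokens > 0 and tokens + seq_len > max_tokens_per_batch:
--             sizes.append(count)
--             count = 0
--             tokens = 0
--         count += 1
--         tokens += seq_len
--     if count:
--         sizes.append(count)
--     # Pass 2: split into chunks of those sizes and emit the four columns.
--     rest = jobs
--     for n in sizes:
--         chunk, rest = rest[:n], rest[n:]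
--         yield ([h for h, _, _, _ in chunk],
--                [s for _, s, _, _ in chunk],
--                [p for _, _, p, _ in chunk],
--                [k for _, _, _, k in chunk])
-- ===== Notes on version B (the rewrite author's own statement) =====
-- stated objective: alternative
-- what changed: Replaces A's single greedy pass that grows four parallel accumulator lists with a two-pass decomposition: a first pass computes only the batch sizes with the greedy token rule, a second pass splits the job list into chunks of those sizes and projects the four columns per chunk.
import Mathlib
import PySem

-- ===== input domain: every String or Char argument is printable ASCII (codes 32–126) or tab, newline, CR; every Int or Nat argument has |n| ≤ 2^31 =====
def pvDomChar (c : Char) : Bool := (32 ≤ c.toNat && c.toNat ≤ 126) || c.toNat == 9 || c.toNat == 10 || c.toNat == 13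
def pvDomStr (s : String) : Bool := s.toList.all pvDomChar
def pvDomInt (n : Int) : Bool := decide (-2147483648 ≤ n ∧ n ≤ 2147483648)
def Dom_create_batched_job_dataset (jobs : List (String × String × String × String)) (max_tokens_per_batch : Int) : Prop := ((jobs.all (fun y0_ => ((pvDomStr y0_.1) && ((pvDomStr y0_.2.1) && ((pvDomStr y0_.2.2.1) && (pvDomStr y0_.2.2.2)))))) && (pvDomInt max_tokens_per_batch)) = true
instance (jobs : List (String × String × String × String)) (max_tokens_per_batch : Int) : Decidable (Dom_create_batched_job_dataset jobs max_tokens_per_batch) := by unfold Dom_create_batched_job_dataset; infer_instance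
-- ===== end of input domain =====

-- B is an alternative decomposition of A (same cost): batch sizes are computed in one
-- pass, the batches are assembled from chunks in a second pass.

-- ===== PORT A =====
-- single greedy pass, growing four parallel accumulator lists; yields become cons
def pvGoA (m : Int) : List (String × String × String × String) →
    List String → List String → List String → List String → Int →
    List (List String × List String × List String × List String)
  | [], bh, bs, bp, bk, _ => if bh ≠ [] then [(bh, bs, bp, bk)] else []
  | (h, s, p, k) :: rest, bh, bs, bp, bk, nt =>
    let L := PySem.Str.len s
    if nt > 0 ∧ nt + L > m then
      (bh, bs, bp, bk) :: pvGoA m rest [h] [s] [p] [k] L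
    else
      pvGoA m rest (bh ++ [h]) (bs ++ [s]) (bp ++ [p]) (bk ++ [k]) (nt + L)

def create_batched_job_dataset (jobs : List (String × String × String × String)) (max_tokens_per_batch : Int) : List (List String × List String × List String × List String) :=
  pvGoA max_tokens_per_batch jobs [] [] [] [] 0

-- ===== PORT B =====
-- pass 1: batch sizes by the greedy token rule
def pvSizesB (m : Int) : List (String × String × String × String) → Nat → Int → List Nat
  | [], count, _ => if count ≠ 0 then [count] else []
  | (_, s, _, _) :: rest, count, tokens =>
    let L := PySem.Str.len s
    if tokens > 0 ∧ tokens + L > m then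
      count :: pvSizesB m rest 1 L
    else
      pvSizesB m rest (count + 1) (tokens + L)

-- pass 2: split the jobs into chunks of those sizes and project the four columns
def pvEmitB : List Nat → List (String × String × String × String) →
    List (List String × List String × List String × List String)
  | [], _ => []
  | n :: ns, rest =>
    (((rest.take n).map (·.1)), ((rest.take n).map (·.2.1)),
     ((rest.take n).map (·.2.2.1)), ((rest.take n).map (·.2.2.2))) :: pvEmitB ns (rest.drop n)

def create_batched_job_dataset_alt (jobs : List (String × String × String × String)) (max_tokens_per_batch : Int) : List (List String × List String × List String × List String) :=
  pvEmitB (pvSizesB max_tokens_per_batch jobs 0 0) jobs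

-- ===== PRECONDITION & SPEC =====
def Spec_create_batched_job_dataset (jobs : List (String × String × String × String)) (max_tokens_per_batch : Int) (out : List (List String × List String × List String × List String)) : Prop := out = create_batched_job_dataset_alt jobs max_tokens_per_batch
instance (jobs : List (String × String × String × String)) (max_tokens_per_batch : Int) (out : List (List String × List String × List String × List String)) : Decidable (Spec_create_batched_job_dataset jobs max_tokens_per_batch out) := by unfold Spec_create_batched_job_dataset; infer_instance

-- ===== CLAIM (what is proved, stated in full; the proofs are below) =====
def Claim_equal_create_batched_job_dataset : Prop := ∀ (jobs : List (String × String × String × String)) (max_tokens_per_batch : Int), Dom_create_batched_job_dataset jobs max_tokens_per_batch → Spec_create_batched_job_dataset jobs max_tokens_per_batch (create_batched_job_dataset jobs max_tokens_per_batch)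

-- ===== LEMMAS AND PROOFS =====

-- total token length of a list of jobs (the running num_tokens of both passes)
def pvTok (l : List (String × String × String × String)) : Int :=
  (l.map (fun j => PySem.Str.len j.2.1)).sum

theorem pvTok_append_single (l : List (String × String × String × String)) (j : String × String × String × String) :
    pvTok (l ++ [j]) = pvTok l + PySem.Str.len j.2.1 := by
  simp [pvTok]

theorem pvMain (m : Int) (rest : List (String × String × String × String)) :
    ∀ cur : List (String × String × String × String),
      pvGoA m rest (cur.map (·.1)) (cur.map (·.2.1)) (cur.map (·.2.2.1)) (cur.map (·.2.2.2)) (pvTok cur)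
        = pvEmitB (pvSizesB m rest cur.length (pvTok cur)) (cur ++ rest) := by
  induction rest with
  | nil =>
    intro cur
    cases cur with
    | nil => simp [pvGoA, pvSizesB, pvEmitB]
    | cons j l =>
      simp only [pvGoA, pvSizesB]
      simp [pvEmitB, List.take_of_length_le]
  | cons j rest ih =>
    intro cur
    obtain ⟨h, s, p, k⟩ := j
    simp only [pvGoA, pvSizesB]
    by_cases hc : pvTok cur > 0 ∧ pvTok cur + PySem.Str.len s > m
    · simp only [if_pos hc]
      have ht : pvTok [(h, s, p, k)] = PySem.Str.len s := by simp [pvTok]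
      have h1 := ih [(h, s, p, k)]
      rw [ht] at h1
      simp only [List.map_cons, List.map_nil, List.length_cons, List.length_nil,
        Nat.zero_add, List.singleton_append] at h1
      simp only [pvEmitB]
      rw [List.take_left, List.drop_left, h1]
    · simp only [if_neg hc]
      have := ih (cur ++ [(h, s, p, k)])
      simpa [pvTok_append_single, List.append_assoc] using this

-- ===== VERDICT (by name: the statement is the Claim_ definition above) =====
theorem create_batched_job_dataset_spec : Claim_equal_create_batched_job_dataset := by
  intro jobs m _
  unfold Spec_create_batched_job_dataset create_batched_job_dataset create_batched_job_dataset_alt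
  have := pvMain m jobs []
  simpa [pvTok] using this
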